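-- pv_equiv track=rewrite | github.com/NirajYagnik/DataMiningAlgo | pincer.py | mfcs_prune
-- ===== SOURCE A (Python) =====
-- def mfcs_prune(C,mfcs):
--     C_new = []
--     for c in C:
--         for l in mfcs:
--             flag = 0
--             if all(ele_check in l for ele_check in c):
--                 flag = 1
--                 C_new.append(c)
--                 break
--         #if(flag == 0):
--             #C.remove(c)
--     return C_new
-- ===== SOURCE B (Python) =====
-- def mfcs_prune(C, mfcs):
--     # Inverted index: for each element, the set of indices of mfcs sets containing it.
--     index = {}
--     for i, l in enumerate(mfcs):
--         for e in l:
--             index.setdefault(e, set()).add(i)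
--     full = set(range(len(mfcs)))
--     C_new = []
--     for c in C:
--         hits = full
--         for e in c:
--             hits = hits & index.get(e, set())
--         if hits:
--             C_new.append(c)
--     return C_new
-- ===== Notes on version B (the rewrite author's own statement) =====
-- stated objective: faster
-- what changed: Replaces A's nested scan (for each candidate, for each mfcs list, a linear membership test per element) by a one-pass inverted index element->set of mfcs indices; a candidate is kept iff the intersection of its elements' index sets is non-empty.
import Mathlib
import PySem

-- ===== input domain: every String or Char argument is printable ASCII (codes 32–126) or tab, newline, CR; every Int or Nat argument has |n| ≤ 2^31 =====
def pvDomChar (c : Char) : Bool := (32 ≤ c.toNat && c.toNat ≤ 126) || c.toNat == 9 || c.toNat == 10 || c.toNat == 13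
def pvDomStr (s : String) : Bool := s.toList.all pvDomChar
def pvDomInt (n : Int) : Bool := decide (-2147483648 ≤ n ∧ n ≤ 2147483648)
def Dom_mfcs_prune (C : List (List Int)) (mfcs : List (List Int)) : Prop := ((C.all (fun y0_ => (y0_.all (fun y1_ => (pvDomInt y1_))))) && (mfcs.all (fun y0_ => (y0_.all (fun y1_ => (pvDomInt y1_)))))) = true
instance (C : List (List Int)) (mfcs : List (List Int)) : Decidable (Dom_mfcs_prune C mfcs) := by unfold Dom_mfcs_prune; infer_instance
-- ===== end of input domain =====

-- B replaces A's inner scan of mfcs (a list-membership test per element) by an inverted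
-- index element -> set of mfcs indices, keeping c iff the intersection over c is non-empty.

-- ===== PORT A =====
-- inner 'for l in mfcs: … break' loop: true at the first l containing every element of c
def pvAInner (c : List Int) : List (List Int) → Bool
  | [] => false
  | l :: ls => if c.all (fun e => l.contains e) then true else pvAInner c ls

def mfcs_prune (C : List (List Int)) (mfcs : List (List Int)) : List (List Int) :=
  C.foldl (fun acc c => if pvAInner c mfcs then acc ++ [c] else acc) []

-- ===== PORT B =====
-- 'for e in l: index.setdefault(e, set()).add(i)'
def pvAddList (i : Int) (l : List Int) (d : PySem.Dict Int (PySem.Set Int)) :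
    PySem.Dict Int (PySem.Set Int) :=
  l.foldl (fun d e => d.insert e (PySem.Set.add (d.getD e PySem.Set.empty) i)) d

-- 'for i, l in enumerate(mfcs): …'
def pvBuild : List (List Int) → Int → PySem.Dict Int (PySem.Set Int) → PySem.Dict Int (PySem.Set Int)
  | [], _, d => d
  | l :: ls, i, d => pvBuild ls (i + 1) (pvAddList i l d)

-- 'for e in c: hits = hits & index.get(e, set())'
def pvHits (idx : PySem.Dict Int (PySem.Set Int)) (c : List Int) (full : PySem.Set Int) :
    PySem.Set Int :=
  c.foldl (fun hits e => PySem.Set.inter hits (idx.getD e PySem.Set.empty)) full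

def mfcs_prune_alt (C : List (List Int)) (mfcs : List (List Int)) : List (List Int) :=
  let idx := pvBuild mfcs 0 PySem.Dict.empty
  let full : PySem.Set Int := PySem.Set.ofList (PySem.List.pyRange 0 (mfcs.length : Int) 1)
  C.foldl (fun acc c => if pvHits idx c full ≠ [] then acc ++ [c] else acc) []

-- ===== PRECONDITION & SPEC =====
def Spec_mfcs_prune (C : List (List Int)) (mfcs : List (List Int)) (out : List (List Int)) : Prop := out = mfcs_prune_alt C mfcs
instance (C : List (List Int)) (mfcs : List (List Int)) (out : List (List Int)) : Decidable (Spec_mfcs_prune C mfcs out) := by unfold Spec_mfcs_prune; infer_instance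

-- ===== CLAIM (what is proved, stated in full; the proofs are below) =====
def Claim_equal_mfcs_prune : Prop := ∀ (C : List (List Int)) (mfcs : List (List Int)), Dom_mfcs_prune C mfcs → Spec_mfcs_prune C mfcs (mfcs_prune C mfcs)

-- ===== LEMMAS AND PROOFS =====

theorem pvAInner_eq_any (c : List Int) (ls : List (List Int)) :
    pvAInner c ls = ls.any (fun l => c.all (fun e => l.contains e)) := by
  induction ls with
  | nil => rfl
  | cons l ls ih =>
    simp only [pvAInner, List.any_cons, ih]
    by_cases h : ∀ x ∈ c, x ∈ l
    · have hc : (c.all fun e => decide (e ∈ l)) = true := List.all_eq_true.2 (by simpa using h)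
      simp [hc]
    · simp [h]

theorem mem_pvAddList (i : Int) (l : List Int) (d : PySem.Dict Int (PySem.Set Int))
    (e x : Int) :
    x ∈ (pvAddList i l d).getD e PySem.Set.empty ↔
      x ∈ d.getD e PySem.Set.empty ∨ (x = i ∧ e ∈ l) := by
  induction l generalizing d with
  | nil => simp [pvAddList]
  | cons a as ih =>
    simp only [pvAddList, List.foldl_cons] at *
    rw [ih, PySem.Dict.getD_insert]
    by_cases h : e = a <;> simp [h, PySem.Set.mem_add] <;> tauto

theorem mem_pvBuild (ls : List (List Int)) (j : Int) (d : PySem.Dict Int (PySem.Set Int))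
    (e x : Int) :
    x ∈ (pvBuild ls j d).getD e PySem.Set.empty ↔
      x ∈ d.getD e PySem.Set.empty ∨
        ∃ k : Nat, ∃ h : k < ls.length, x = j + k ∧ e ∈ ls[k] := by
  induction ls generalizing j d with
  | nil => simp [pvBuild]
  | cons l ls ih =>
    rw [pvBuild, ih, mem_pvAddList]
    constructor
    · rintro ((h | ⟨hx, he⟩) | ⟨k, hk, hx, he⟩)
      · exact Or.inl h
      · exact Or.inr ⟨0, by simp, by omega, by simpa using he⟩
      · exact Or.inr ⟨k + 1, by simpa using hk, by push_cast; omega, by simpa using he⟩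
    · rintro (h | ⟨k, hk, hx, he⟩)
      · exact Or.inl (Or.inl h)
      · cases k with
        | zero => exact Or.inl (Or.inr ⟨by omega, by simpa using he⟩)
        | succ k =>
          exact Or.inr ⟨k, by simpa using hk, by push_cast at hx ⊢; omega, by simpa using he⟩

theorem mem_pvHits (idx : PySem.Dict Int (PySem.Set Int)) (c : List Int)
    (full : PySem.Set Int) (x : Int) :
    x ∈ pvHits idx c full ↔ x ∈ full ∧ ∀ e ∈ c, x ∈ idx.getD e PySem.Set.empty := by
  induction c generalizing full with
  | nil => simp [pvHits]
  | cons a as ih =>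
    rw [pvHits, List.foldl_cons, ← pvHits, ih, PySem.Set.mem_inter]
    simp
    tauto

theorem pvKeep_iff (mfcs : List (List Int)) (c : List Int) :
    (pvHits (pvBuild mfcs 0 PySem.Dict.empty) c
        (PySem.Set.ofList (PySem.List.pyRange 0 (mfcs.length : Int) 1)) ≠ []) ↔
      pvAInner c mfcs = true := by
  rw [pvAInner_eq_any]
  constructor
  · intro hne
    obtain ⟨x, hx⟩ := List.exists_mem_of_ne_nil _ hne
    rw [mem_pvHits] at hx
    obtain ⟨hfull, hall⟩ := hx
    rw [PySem.Set.mem_ofList, PySem.List.mem_pyRange_one] at hfull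
    refine List.any_eq_true.2 ⟨mfcs[x.toNat]'(by omega), List.getElem_mem _, ?_⟩
    rw [List.all_eq_true]
    intro e he
    have := hall e he
    rw [mem_pvBuild] at this
    rcases this with h | ⟨k, hk, hxk, hek⟩
    · simp [PySem.Dict.empty, PySem.Dict.getD, PySem.Dict.get?, PySem.Set.empty] at h
    · have : x.toNat = k := by omega
      simpa [List.contains_iff_mem, this] using hek
  · intro h
    rw [List.any_eq_true] at h
    obtain ⟨l, hl, hall⟩ := h
    obtain ⟨k, hk, rfl⟩ := List.mem_iff_getElem.1 hl
    apply List.ne_nil_of_mem (a := (k : Int))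
    rw [mem_pvHits]
    constructor
    · rw [PySem.Set.mem_ofList, PySem.List.mem_pyRange_one]
      omega
    · intro e he
      rw [mem_pvBuild]
      refine Or.inr ⟨k, hk, by omega, ?_⟩
      rw [List.all_eq_true] at hall
      simpa [List.contains_iff_mem] using hall e he

-- ===== VERDICT (by name: the statement is the Claim_ definition above) =====
theorem mfcs_prune_spec : Claim_equal_mfcs_prune := by
  intro C mfcs _
  unfold Spec_mfcs_prune mfcs_prune mfcs_prune_alt
  have hfun : (fun (acc : List (List Int)) c => if pvAInner c mfcs then acc ++ [c] else acc)
      = (fun (acc : List (List Int)) c =>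
          if pvHits (pvBuild mfcs 0 PySem.Dict.empty) c
              (PySem.Set.ofList (PySem.List.pyRange 0 (mfcs.length : Int) 1)) ≠ [] then
            acc ++ [c] else acc) := by
    funext acc c
    by_cases h : pvAInner c mfcs <;> simp [h, pvKeep_iff]
  rw [hfun]
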